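-- pv_equiv track=rewrite | github.com/DeniceKe/FASSETS | assets/qr.py | _build_data_codewords
-- ===== SOURCE A (Python) =====
-- ALPHANUMERIC_CHARSET = "0123456789ABCDEFGHIJKLMNOPQRSTUVWXYZ $%*+-./:"
--
-- DATA_CODEWORDS = 19
--
-- def _build_data_codewords(data):
--     bits = ["0010", format(len(data), "09b")]
--
--     pairs = [data[index:index + 2] for index in range(0, len(data), 2)]
--     for pair in pairs:
--         if len(pair) == 2:
--             value = ALPHANUMERIC_CHARSET.index(pair[0]) * 45 + ALPHANUMERIC_CHARSET.index(pair[1])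
--             bits.append(format(value, "011b"))
--         else:
--             value = ALPHANUMERIC_CHARSET.index(pair)
--             bits.append(format(value, "06b"))
--
--     bit_string = "".join(bits)
--     capacity = DATA_CODEWORDS * 8
--     bit_string += "0" * min(4, capacity - len(bit_string))
--     while len(bit_string) % 8 != 0:
--         bit_string += "0"
--
--     codewords = [int(bit_string[index:index + 8], 2) for index in range(0, len(bit_string), 8)]
--     pad_bytes = [0xEC, 0x11]
--     pad_index = 0
--     while len(codewords) < DATA_CODEWORDS:
--         codewords.append(pad_bytes[pad_index % 2])
--         pad_index += 1
--     return codewords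
-- ===== SOURCE B (Python) =====
-- ALPHANUMERIC_CHARSET = "0123456789ABCDEFGHIJKLMNOPQRSTUVWXYZ $%*+-./:"
--
-- DATA_CODEWORDS = 19
--
--
-- def _to_bits(value, width):
--     """Binary digits of value, most significant first, zero-padded to width."""
--     digits = []
--     while value:
--         digits.append(value % 2)
--         value //= 2
--     digits.extend([0] * (width - len(digits)))
--     digits.reverse()
--     return digits
--
--
-- def _build_data_codewords(data):
--     codewords = []
--     acc = 0
--     nbits = 0
--
--     def push(value, width):
--         nonlocal acc, nbits
--         for bit in _to_bits(value, width):
--             acc = acc * 2 + bit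
--             nbits += 1
--             if nbits == 8:
--                 codewords.append(acc)
--                 acc = 0
--                 nbits = 0
--
--     push(2, 4)
--     push(len(data), 9)
--     for i in range(0, len(data), 2):
--         chunk = data[i:i + 2]
--         if len(chunk) == 2:
--             push(ALPHANUMERIC_CHARSET.index(chunk[0]) * 45 + ALPHANUMERIC_CHARSET.index(chunk[1]), 11)
--         else:
--             push(ALPHANUMERIC_CHARSET.index(chunk), 6)
--
--     used = 8 * len(codewords) + nbits
--     terminator = min(4, DATA_CODEWORDS * 8 - used)
--     if terminator > 0:
--         push(0, terminator)
--     if nbits > 0: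
--         push(0, 8 - nbits)
--
--     for k in range(DATA_CODEWORDS - len(codewords)):
--         codewords.append((0xEC, 0x11)[k % 2])
--     return codewords
-- ===== Notes on version B (the rewrite author's own statement) =====
-- stated objective: alternative
-- what changed: B replaces A's pipeline of building a list of binary strings, joining them, padding the joined string and re-parsing it in 8-character slices with int(,2) by a streaming integer bit accumulator that feeds in the binary digits of each field one bit at a time and flushes each completed byte directly into the codeword list; Pre_ excludes exactly the strings containing a character outside the alphanumeric charset, on which A's str.index raises ValueError.
import Mathlib
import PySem

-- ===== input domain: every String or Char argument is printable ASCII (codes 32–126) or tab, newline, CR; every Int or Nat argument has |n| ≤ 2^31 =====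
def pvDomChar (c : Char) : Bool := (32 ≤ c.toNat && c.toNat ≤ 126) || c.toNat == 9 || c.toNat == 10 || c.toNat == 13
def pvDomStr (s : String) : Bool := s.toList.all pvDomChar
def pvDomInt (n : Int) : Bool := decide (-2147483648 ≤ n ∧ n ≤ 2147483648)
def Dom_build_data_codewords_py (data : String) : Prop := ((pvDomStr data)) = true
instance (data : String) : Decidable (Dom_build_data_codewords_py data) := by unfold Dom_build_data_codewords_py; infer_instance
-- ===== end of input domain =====

-- B replaces A's build-a-bit-string / join / re-parse-8-char-chunks pipeline by a streaming
-- integer bit accumulator fed one binary digit at a time (objective: alternative; same O(n)).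

-- ALPHANUMERIC_CHARSET
def alnumCharset : List Char := "0123456789ABCDEFGHIJKLMNOPQRSTUVWXYZ $%*+-./:".toList

-- ALPHANUMERIC_CHARSET.index(c): exact whenever c occurs in the charset (guaranteed by Pre_;
-- Python raises ValueError otherwise, which Pre_ excludes).
def chIdx (c : Char) : Int := (alnumCharset.idxOf c : Int)

-- ===== PORT A =====

-- binary digits of a natural number, most significant first (bin(n) without the '0b');
-- structural recursion on a fuel that n halvings can never exhaust
def binDigitsAux : Nat → Nat → List Char
  | 0, n => [if n == 1 then '1' else '0']
  | fuel + 1, n =>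
    if n < 2 then [if n == 1 then '1' else '0']
    else binDigitsAux fuel (n / 2) ++ [if n % 2 == 1 then '1' else '0']

def binDigits (n : Nat) : List Char := binDigitsAux n n

-- format(v, "0{w}b"): binary of v zero-padded on the left to at least w digits; exact for 0 ≤ v
def fmt (v : Int) (w : Nat) : List Char :=
  let b := binDigits v.toNat
  List.replicate (w - b.length) '0' ++ b

-- int(s, 2): exact on the nonempty '0'/'1' strings it is applied to here
def binVal (s : List Char) : Int :=
  s.foldl (fun a c => 2 * a + (if c == '1' then 1 else 0)) 0

-- while len(bit_string) % 8 != 0: bit_string += "0"   (at most 7 iterations, so fuel 8 suffices)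
def padTo8Aux : Nat → List Char → List Char
  | 0, s => s
  | fuel + 1, s => if s.length % 8 ≠ 0 then padTo8Aux fuel (s ++ ['0']) else s

def padTo8 (s : List Char) : List Char := padTo8Aux 8 s

-- while len(codewords) < DATA_CODEWORDS: append pad_bytes[pad_index % 2]
-- (at most DATA_CODEWORDS = 19 iterations, so fuel 19 suffices)
def padCWAux : Nat → List Int → Nat → List Int
  | 0, cw, _ => cw
  | fuel + 1, cw, padIndex =>
    if cw.length < 19 then
      padCWAux fuel (cw ++ [if padIndex % 2 == 0 then 236 else 17]) (padIndex + 1)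
    else cw

def padCW (cw : List Int) (padIndex : Nat) : List Int := padCWAux 19 cw padIndex

def build_data_codewords_py (data : String) : List Int :=
  let d := data.toList
  let bits0 : List (List Char) := [fmt 2 4, fmt (d.length : Int) 9]
  let pairs : List (List Char) :=
    (PySem.List.pyRange 0 (d.length : Int) 2).map
      (fun index => PySem.List.slice d (some index) (some (index + 2)))
  let bits : List (List Char) :=
    pairs.foldl (fun bs pair =>
      if pair.length == 2 then
        bs ++ [fmt (chIdx ((PySem.List.pyGet? pair 0).getD ' ') * 45 +
                    chIdx ((PySem.List.pyGet? pair 1).getD ' ')) 11]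
      else
        bs ++ [fmt (chIdx ((PySem.List.pyGet? pair 0).getD ' ')) 6]) bits0
  let bitString0 := bits.flatten
  -- "0" * min(4, capacity - len(bit_string))  ("0" * k is "" for k < 0, as .toNat clamps)
  let bitString1 := bitString0 ++ List.replicate (min 4 (152 - (bitString0.length : Int))).toNat '0'
  let bitString2 := padTo8 bitString1
  let codewords :=
    (PySem.List.pyRange 0 (bitString2.length : Int) 8).map
      (fun index => binVal (PySem.List.slice bitString2 (some index) (some (index + 8))))
  padCW codewords 0

-- ===== PORT B =====

-- the while loop of _to_bits: while value: digits.append(value % 2); value //= 2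
-- (collects the binary digits least significant first; value ≥ 0 here, so value.toNat
-- halvings are enough fuel for the loop to reach 0)
def toBitsCore : Nat → Int → List Int
  | 0, _ => []
  | fuel + 1, v =>
    if v ≠ 0 then PySem.Int.mod v 2 :: toBitsCore fuel (PySem.Int.floordiv v 2) else []

-- _to_bits(value, width): digits, zero-extended to width ([0] * k is [] for k < 0, as
-- .toNat clamps), then reversed to most-significant-first order
def toBits (value : Int) (width : Int) : List Int :=
  let digits := toBitsCore value.toNat value
  let digits := digits ++ List.replicate (width - (digits.length : Int)).toNat 0
  digits.reverse

-- the body of push's for loop: acc = acc*2 + bit; nbits += 1; flush a byte at nbits == 8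
def pushBit (st : List Int × Int × Int) (bit : Int) : List Int × Int × Int :=
  let acc := st.2.1 * 2 + bit
  let nbits := st.2.2 + 1
  if nbits == 8 then (st.1 ++ [acc], 0, 0) else (st.1, acc, nbits)

-- push(value, width): for bit in _to_bits(value, width): …
def pushB (st : List Int × Int × Int) (value : Int) (width : Int) : List Int × Int × Int :=
  (toBits value width).foldl pushBit st

def build_data_codewords_py_alt (data : String) : List Int :=
  let d := data.toList
  let st0 := pushB ([], 0, 0) 2 4
  let st1 := pushB st0 (d.length : Int) 9
  let st2 :=
    (PySem.List.pyRange 0 (d.length : Int) 2).foldl (fun st i =>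
      let chunk := PySem.List.slice d (some i) (some (i + 2))
      if chunk.length == 2 then
        pushB st (chIdx ((PySem.List.pyGet? chunk 0).getD ' ') * 45 +
                  chIdx ((PySem.List.pyGet? chunk 1).getD ' ')) 11
      else
        pushB st (chIdx ((PySem.List.pyGet? chunk 0).getD ' ')) 6) st1
  let used := 8 * (st2.1.length : Int) + st2.2.2
  let terminator := min 4 (152 - used)
  let st3 := if 0 < terminator then pushB st2 0 terminator else st2
  let st4 := if 0 < st3.2.2 then pushB st3 0 (8 - st3.2.2) else st3
  st4.1 ++ (PySem.List.pyRange 0 (19 - (st4.1.length : Int)) 1).map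
    (fun k => if PySem.Int.mod k 2 == 0 then 236 else 17)

-- ===== PRECONDITION & SPEC =====
-- Pre_ excludes exactly the strings containing a character outside the alphanumeric charset,
-- on which A's ALPHANUMERIC_CHARSET.index raises ValueError.
def Pre_build_data_codewords_py (data : String) : Prop :=
  (data.toList.all (fun c => alnumCharset.contains c)) = true
instance (data : String) : Decidable (Pre_build_data_codewords_py data) := by
  unfold Pre_build_data_codewords_py; infer_instance

def pvWitness_build_data_codewords_py : String := "HELLO WORLD"

def Spec_build_data_codewords_py (data : String) (out : List Int) : Prop := out = build_data_codewords_py_alt data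
instance (data : String) (out : List Int) : Decidable (Spec_build_data_codewords_py data out) := by unfold Spec_build_data_codewords_py; infer_instance

-- ===== CLAIM (what is proved, stated in full; the proofs are below) =====
def Claim_equal_build_data_codewords_py : Prop := ∀ (data : String), Dom_build_data_codewords_py data → Pre_build_data_codewords_py data → Spec_build_data_codewords_py data (build_data_codewords_py data)

-- ===== LEMMAS AND PROOFS =====

-- the integer bit a bit character denotes
def charToBit (c : Char) : Int := if c == '1' then 1 else 0

-- the byte values of an (8-aligned) bit string, 8 bits at a time
def bytesOf : List Char → List Int
  | [] => []
  | c :: s => binVal (List.take 8 (c :: s)) :: bytesOf (List.drop 8 (c :: s))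
  termination_by s => s.length
  decreasing_by simp only [List.length_drop, List.length_cons]; omega

-- the accumulator state that corresponds to having pushed exactly the bits S
def stBits (S : List Char) : List Int × Int × Int :=
  (bytesOf (S.take (S.length - S.length % 8)),
   binVal (S.drop (S.length - S.length % 8)),
   ((S.length % 8 : Nat) : Int))

def fieldV (pr : List Char) : Int :=
  if pr.length == 2 then
    chIdx ((PySem.List.pyGet? pr 0).getD ' ') * 45 + chIdx ((PySem.List.pyGet? pr 1).getD ' ')
  else chIdx ((PySem.List.pyGet? pr 0).getD ' ')

def fieldW (pr : List Char) : Nat := if pr.length == 2 then 11 else 6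

theorem binVal_foldl_shift (s : List Char) (a : Int) :
    s.foldl (fun a c => 2 * a + (if c == '1' then 1 else 0)) a = a * 2 ^ s.length + binVal s := by
  induction s generalizing a with
  | nil => simp [binVal]
  | cons c s ih =>
    have hb : binVal (c :: s) =
        List.foldl (fun a c => 2 * a + (if c == '1' then 1 else 0))
          (2 * 0 + (if c == '1' then 1 else 0)) s := rfl
    simp only [List.foldl_cons, List.length_cons, hb]
    rw [ih, ih (2 * 0 + _)]
    ring

theorem binVal_append (X Y : List Char) :
    binVal (X ++ Y) = binVal X * 2 ^ Y.length + binVal Y := by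
  unfold binVal
  rw [List.foldl_append, binVal_foldl_shift]
  rfl

theorem binVal_singleton (c : Char) :
    binVal [c] = (if c == '1' then 1 else 0) := by
  simp [binVal]

theorem fmt_zero (w : Nat) (hw : 1 ≤ w) : fmt 0 w = List.replicate w '0' := by
  unfold fmt
  have hb : binDigits (0 : Int).toNat = ['0'] := by
    rw [show (0 : Int).toNat = 0 from rfl, binDigits]
    simp [binDigitsAux]
  rw [hb]
  simp only [List.length_singleton]
  rw [show w = (w - 1) + 1 from by omega, List.replicate_succ']
  simp

theorem bytesOf_cons (c : Char) (s : List Char) :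
    bytesOf (c :: s) = binVal (List.take 8 (c :: s)) :: bytesOf (List.drop 8 (c :: s)) := by
  rw [bytesOf]

theorem bytesOf_eq_cons (X : List Char) (h : X ≠ []) :
    bytesOf X = binVal (X.take 8) :: bytesOf (X.drop 8) := by
  cases X with
  | nil => exact absurd rfl h
  | cons c s => exact bytesOf_cons c s

theorem bytesOf_append_aux (n : Nat) : ∀ (X Y : List Char), X.length = n → X.length % 8 = 0 →
    bytesOf (X ++ Y) = bytesOf X ++ bytesOf Y := by
  induction n using Nat.strong_induction_on with
  | _ n ih =>
    intro X Y hn h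
    cases X with
    | nil => simp [bytesOf]
    | cons c X' =>
      have h8 : 8 ≤ (c :: X').length := by
        have : 0 < (c :: X').length := by simp
        omega
      rw [List.cons_append, bytesOf_cons, bytesOf_cons c X', ← List.cons_append]
      rw [List.take_append, List.drop_append]
      rw [show 8 - (c :: X').length = 0 from by omega]
      simp only [List.take_zero, List.append_nil, List.drop_zero, List.cons_append]
      congr 1
      exact ih ((c :: X').length - 8) (by omega) _ Y (by simp) (by simp at h ⊢; omega)

theorem bytesOf_append (X Y : List Char) (h : X.length % 8 = 0) :
    bytesOf (X ++ Y) = bytesOf X ++ bytesOf Y :=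
  bytesOf_append_aux X.length X Y rfl h

theorem bytesOf_length_aux (n : Nat) : ∀ (X : List Char), X.length = n → X.length % 8 = 0 →
    (bytesOf X).length = X.length / 8 := by
  induction n using Nat.strong_induction_on with
  | _ n ih =>
    intro X hn h
    cases X with
    | nil => simp [bytesOf]
    | cons c X' =>
      simp only [List.length_cons] at hn h ⊢
      have h8 : 8 ≤ X'.length + 1 := by omega
      rw [bytesOf_cons, List.length_cons,
        ih (X'.length + 1 - 8) (by omega) _ (by simp) (by simp; omega)]
      simp only [List.length_drop, List.length_cons]
      omega

theorem bytesOf_length (X : List Char) (h : X.length % 8 = 0) :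
    (bytesOf X).length = X.length / 8 :=
  bytesOf_length_aux X.length X rfl h

theorem toBitsCore_zero (fuel : Nat) : toBitsCore fuel 0 = [] := by
  cases fuel <;> simp [toBitsCore]

theorem toBitsCore_eq : ∀ (fuel n : Nat), 1 ≤ n → n ≤ fuel →
    (toBitsCore fuel ((n : Nat) : Int)).reverse = (binDigitsAux fuel n).map charToBit := by
  intro fuel
  induction fuel with
  | zero => intro n h1 h2; omega
  | succ fuel ih =>
    intro n h1 h2
    have hne : (((n : Nat) : Int) ≠ 0) := by exact_mod_cast (by omega : n ≠ 0)
    simp only [toBitsCore, if_pos hne]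
    have hmod : PySem.Int.mod ((n : Nat) : Int) 2 = (((n % 2 : Nat)) : Int) := by
      rw [PySem.Int.mod_eq_emod_of_pos (by norm_num)]; omega
    have hdiv : PySem.Int.floordiv ((n : Nat) : Int) 2 = (((n / 2 : Nat)) : Int) := by
      rw [PySem.Int.floordiv_eq_ediv_of_pos (by norm_num)]; omega
    rw [hmod, hdiv]
    by_cases hlt : n < 2
    · have hn1 : n = 1 := by omega
      subst hn1
      rw [show ((1 / 2 : Nat) : Int) = 0 from by norm_num, toBitsCore_zero]
      simp [binDigitsAux, charToBit]
    · simp only [binDigitsAux, if_neg hlt, List.map_append, List.reverse_cons]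
      rw [ih (n / 2) (by omega) (by omega)]
      refine congrArg₂ _ rfl ?_
      simp only [List.map_cons, List.map_nil, charToBit]
      by_cases h2' : n % 2 = 1
      · simp [h2']
      · have : n % 2 = 0 := by omega
        simp [this]

theorem toBits_eq_fmt (v w : Int) (hv : 0 ≤ v) (hw : 1 ≤ w) :
    toBits v w = (fmt v w.toNat).map charToBit := by
  by_cases h0 : v = 0
  · subst h0
    rw [fmt_zero w.toNat (by omega)]
    simp only [toBits, show (0 : Int).toNat = 0 from rfl, toBitsCore_zero, List.nil_append,
      List.length_nil, Nat.cast_zero, sub_zero, List.reverse_replicate, List.map_replicate]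
    rw [show charToBit '0' = 0 from rfl]
  · have hn1 : 1 ≤ v.toNat := by omega
    have hvcast : v = ((v.toNat : Nat) : Int) := by omega
    have hcore : (toBitsCore v.toNat v).reverse = (binDigits v.toNat).map charToBit := by
      rw [binDigits]
      conv_lhs => rw [hvcast]
      exact toBitsCore_eq v.toNat v.toNat hn1 le_rfl
    have hlen : (toBitsCore v.toNat v).length = (binDigits v.toNat).length := by
      have := congrArg List.length hcore
      simpa using this
    simp only [toBits, fmt, List.map_append, List.map_replicate, List.reverse_append,
      List.reverse_replicate]
    rw [hcore, hlen, show charToBit '0' = 0 from rfl]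
    refine congrArg₂ _ ?_ rfl
    refine congrArg₂ _ ?_ rfl
    omega

theorem pushBit_stBits (S : List Char) (c : Char) :
    pushBit (stBits S) (charToBit c) = stBits (S ++ [c]) := by
  have hr : S.length % 8 < 8 := Nat.mod_lt _ (by norm_num)
  have hlen : (S ++ [c]).length = S.length + 1 := by simp
  have hbv : binVal (S.drop (S.length - S.length % 8) ++ [c]) =
      binVal (S.drop (S.length - S.length % 8)) * 2 + charToBit c := by
    rw [binVal_append, binVal_singleton]
    simp [charToBit]
  by_cases h7 : S.length % 8 = 7
  · have hcond : ((((S.length % 8 : Nat)) : Int) + 1 == 8) = true := by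
      rw [h7]; decide
    rw [h7] at hbv
    have hm : (S.length + 1) % 8 = 0 := by omega
    have hplen : (S.take (S.length - 7)).length = S.length - 7 := by
      rw [List.length_take]; omega
    have hqlen : (S.drop (S.length - 7) ++ [c]).length = 8 := by
      simp only [List.length_append, List.length_drop, List.length_singleton]
      omega
    have hdecomp : S ++ [c] =
        S.take (S.length - 7) ++ (S.drop (S.length - 7) ++ [c]) := by
      rw [← List.append_assoc, List.take_append_drop]
    have hbytes : bytesOf (S ++ [c]) = bytesOf (S.take (S.length - 7)) ++
        [binVal (S.drop (S.length - 7)) * 2 + charToBit c] := by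
      conv_lhs => rw [hdecomp]
      rw [bytesOf_append _ _ (by rw [hplen]; omega)]
      refine congrArg₂ _ rfl ?_
      rw [bytesOf_eq_cons (S.drop (S.length - 7) ++ [c])
            (by intro hnil; rw [hnil] at hqlen; simp at hqlen),
        show (S.drop (S.length - 7) ++ [c]).take 8 = S.drop (S.length - 7) ++ [c] from
          List.take_of_length_le (by omega),
        show (S.drop (S.length - 7) ++ [c]).drop 8 = [] from
          List.drop_of_length_le (by omega),
        show bytesOf ([] : List Char) = [] from by simp [bytesOf], hbv]
    have htake : (S ++ [c]).take ((S ++ [c]).length - (S ++ [c]).length % 8) = S ++ [c] :=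
      List.take_of_length_le (by rw [hlen, hm]; omega)
    have hdrop2 : (S ++ [c]).drop ((S ++ [c]).length - (S ++ [c]).length % 8) = [] :=
      List.drop_of_length_le (by rw [hlen, hm]; omega)
    have hmod2 : (S ++ [c]).length % 8 = 0 := by rw [hlen]; exact hm
    simp only [pushBit, stBits, hcond, if_true]
    rw [htake, hdrop2, hmod2, hbytes, h7]
    simp [binVal]
  · have hcond : ((((S.length % 8 : Nat)) : Int) + 1 == 8) = false := by
      simp only [beq_eq_false_iff_ne, ne_eq]
      intro hx
      exact h7 (by omega)
    simp only [pushBit, stBits, hcond, Bool.false_eq_true, if_false]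
    have hm : (S.length + 1) % 8 = S.length % 8 + 1 := by omega
    have hsub : S.length + 1 - (S.length % 8 + 1) = S.length - S.length % 8 := by omega
    rw [hlen, hm, hsub]
    have htake : (S ++ [c]).take (S.length - S.length % 8) =
        S.take (S.length - S.length % 8) :=
      List.take_append_of_le_length (by omega)
    have hdrop : (S ++ [c]).drop (S.length - S.length % 8) =
        S.drop (S.length - S.length % 8) ++ [c] :=
      List.drop_append_of_le_length (by omega)
    rw [htake, hdrop, hbv]
    refine Prod.ext rfl (Prod.ext rfl ?_)
    push_cast
    ring

theorem foldl_pushBit (T : List Char) : ∀ (S : List Char),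
    (T.map charToBit).foldl pushBit (stBits S) = stBits (S ++ T) := by
  induction T with
  | nil => intro S; simp
  | cons c T ih =>
    intro S
    rw [List.map_cons, List.foldl_cons, pushBit_stBits, ih (S ++ [c]),
      List.append_assoc, List.singleton_append]

theorem push_stBits (S : List Char) (v w : Int) (hv : 0 ≤ v) (hw : 1 ≤ w) :
    pushB (stBits S) v w = stBits (S ++ fmt v w.toNat) := by
  unfold pushB
  rw [toBits_eq_fmt v w hv hw, foldl_pushBit]

theorem chIdx_nonneg (c : Char) : 0 ≤ chIdx c := by
  unfold chIdx
  positivity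

theorem foldl_push_fields (prs : List (List Char)) (S : List Char) :
    prs.foldl (fun st pr => pushB st (fieldV pr) ((fieldW pr : Int))) (stBits S) =
      stBits (S ++ (prs.map (fun pr => fmt (fieldV pr) (fieldW pr))).flatten) := by
  induction prs generalizing S with
  | nil => simp
  | cons pr prs ih =>
    simp only [List.foldl_cons, List.map_cons, List.flatten_cons]
    have hv : 0 ≤ fieldV pr := by
      unfold fieldV
      split
      · have := chIdx_nonneg ((PySem.List.pyGet? pr 0).getD ' ')
        have := chIdx_nonneg ((PySem.List.pyGet? pr 1).getD ' ')
        omega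
      · exact chIdx_nonneg _
    have hwn : 1 ≤ fieldW pr := by unfold fieldW; split <;> omega
    rw [push_stBits S _ _ hv (by exact_mod_cast hwn),
      show ((fieldW pr : Nat) : Int).toNat = fieldW pr from by omega,
      ih (S ++ fmt (fieldV pr) (fieldW pr)),
      List.append_assoc]

theorem stBits_total (S : List Char) :
    8 * (((stBits S).1.length : Nat) : Int) + (stBits S).2.2 = (S.length : Int) := by
  simp only [stBits]
  have hpre : (S.take (S.length - S.length % 8)).length = S.length - S.length % 8 := by
    rw [List.length_take]; omega
  rw [bytesOf_length _ (by rw [hpre]; omega), hpre]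
  omega

theorem padTo8Aux_eq : ∀ (fuel : Nat) (s : List Char), (8 - s.length % 8) % 8 ≤ fuel →
    padTo8Aux fuel s = s ++ List.replicate ((8 - s.length % 8) % 8) '0' := by
  intro fuel
  induction fuel with
  | zero =>
    intro s h
    rw [show (8 - s.length % 8) % 8 = 0 from by omega]
    simp [padTo8Aux]
  | succ fuel ih =>
    intro s h
    simp only [padTo8Aux]
    split
    · rename_i hne
      rw [ih (s ++ ['0']) (by simp only [List.length_append, List.length_singleton]; omega)]
      simp only [List.length_append, List.length_singleton]
      rw [List.append_assoc, List.singleton_append,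
        show (8 - s.length % 8) % 8 = (8 - (s.length + 1) % 8) % 8 + 1 from by omega,
        List.replicate_succ]
    · rename_i he
      simp only [Decidable.not_not] at he
      rw [he]
      simp

theorem padTo8_eq (s : List Char) :
    padTo8 s = s ++ List.replicate ((8 - s.length % 8) % 8) '0' :=
  padTo8Aux_eq 8 s (by omega)

theorem padCWAux_eq : ∀ (fuel : Nat) (cw : List Int) (p : Nat), 19 - cw.length ≤ fuel →
    padCWAux fuel cw p = cw ++ (List.range (19 - cw.length)).map
      (fun j => if (p + j) % 2 == 0 then (236 : Int) else 17) := by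
  intro fuel
  induction fuel with
  | zero =>
    intro cw p h
    rw [show 19 - cw.length = 0 from by omega]
    simp [padCWAux]
  | succ fuel ih =>
    intro cw p h
    simp only [padCWAux]
    split
    · rename_i hlt
      rw [ih _ (p + 1) (by simp only [List.length_append, List.length_singleton]; omega)]
      simp only [List.length_append, List.length_singleton]
      rw [List.append_assoc, List.singleton_append,
        show 19 - cw.length = (19 - (cw.length + 1)) + 1 from by omega,
        List.range_succ_eq_map, List.map_cons, List.map_map]
      have hcomp : ((fun j => if (p + j) % 2 == 0 then (236 : Int) else 17) ∘ Nat.succ) =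
          (fun j => if (p + 1 + j) % 2 == 0 then (236 : Int) else 17) := by
        funext j
        simp only [Function.comp_apply, Nat.succ_eq_add_one]
        rw [show p + (j + 1) = p + 1 + j from by omega]
      rw [hcomp]
      simp
    · rename_i hge
      rw [show 19 - cw.length = 0 from by omega]
      simp

theorem padCW_eq (cw : List Int) (p : Nat) :
    padCW cw p = cw ++ (List.range (19 - cw.length)).map
      (fun j => if (p + j) % 2 == 0 then (236 : Int) else 17) :=
  padCWAux_eq 19 cw p (by omega)

theorem chunks_eq (m : Nat) (S : List Char) (h : S.length = 8 * m) :
    (List.range m).map (fun k => binVal ((S.drop (8 * k)).take 8)) = bytesOf S := by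
  induction m generalizing S with
  | zero =>
    have hnil : S = [] := List.eq_nil_of_length_eq_zero (by omega)
    subst hnil
    simp [bytesOf]
  | succ m ih =>
    have hne : S ≠ [] := by
      intro hnil
      rw [hnil] at h
      simp only [List.length_nil] at h
      omega
    rw [bytesOf_eq_cons S hne, List.range_succ_eq_map, List.map_cons, List.map_map]
    refine congrArg₂ List.cons (by norm_num) ?_
    rw [← ih (S.drop 8) (by rw [List.length_drop]; omega)]
    refine List.map_congr_left (fun k hk => ?_)
    simp only [Function.comp_apply, Nat.succ_eq_add_one, List.drop_drop]
    rw [show (8 : Nat) + 8 * k = 8 * (k + 1) from by omega]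

theorem chunkParse (S : List Char) (h : S.length % 8 = 0) :
    (PySem.List.pyRange 0 (S.length : Int) 8).map
      (fun index => binVal (PySem.List.slice S (some index) (some (index + 8)))) = bytesOf S := by
  rw [PySem.List.pyRange_of_pos _ _ (by norm_num : (0 : Int) < 8)]
  have hcount : (if (0 : Int) < (S.length : Int) then
      (((S.length : Int) - 0 + 8 - 1) / 8).toNat else 0) = S.length / 8 := by
    split <;> omega
  rw [hcount, List.map_map, ← chunks_eq (S.length / 8) S (by omega)]
  refine List.map_congr_left (fun k hk => ?_)
  simp only [Function.comp_apply]
  have h1 : (0 : Int) + 8 * (k : Int) = ((8 * k : Nat) : Int) := by push_cast; ring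
  rw [h1, show ((8 * k : Nat) : Int) + (8 : Int) = ((8 * k : Nat) : Int) + ((8 : Nat) : Int)
    from by norm_cast, PySem.List.slice_natCast_add]

set_option maxRecDepth 4096 in
set_option maxHeartbeats 1000000 in
theorem main_eq (data : String) :
    build_data_codewords_py data = build_data_codewords_py_alt data := by
  have hbodyA : (fun (bs : List (List Char)) (pair : List Char) =>
      if pair.length == 2 then
        bs ++ [fmt (chIdx ((PySem.List.pyGet? pair 0).getD ' ') * 45 +
                    chIdx ((PySem.List.pyGet? pair 1).getD ' ')) 11]
      else bs ++ [fmt (chIdx ((PySem.List.pyGet? pair 0).getD ' ')) 6]) =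
      (fun bs pair => bs ++ [fmt (fieldV pair) (fieldW pair)]) := by
    funext bs pair
    unfold fieldV fieldW
    by_cases hp : (pair.length == 2) = true <;> simp [hp]
  set d := data.toList with hd
  set prs : List (List Char) := (PySem.List.pyRange 0 ((d.length : Nat) : Int) 2).map
    (fun index => PySem.List.slice d (some index) (some (index + 2))) with hprs
  set F0 : List Char := fmt 2 4 ++ fmt ((d.length : Nat) : Int) 9 with hF0
  set FL : List Char := (prs.map (fun pr => fmt (fieldV pr) (fieldW pr))).flatten with hFL
  set S : List Char := F0 ++ FL with hSdef
  set k1 : Nat := (min (4 : Int) (152 - (S.length : Int))).toNat with hk1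
  set S1 : List Char := S ++ List.replicate k1 '0' with hS1def
  set S2 : List Char := S1 ++ List.replicate ((8 - S1.length % 8) % 8) '0' with hS2def
  have h28 : S2.length % 8 = 0 := by
    rw [hS2def]
    simp only [List.length_append, List.length_replicate]
    omega
  have hfin : (stBits S2).1 = bytesOf S2 := by
    simp only [stBits, h28, Nat.sub_zero, List.take_length]
  have hA : build_data_codewords_py data = bytesOf S2 ++
      (List.range (19 - (bytesOf S2).length)).map
        (fun j => if (0 + j) % 2 == 0 then (236 : Int) else 17) := by
    simp only [build_data_codewords_py]
    rw [← hd, hbodyA, PySem.List.foldl_append_singleton_eq_map, ← hprs]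
    rw [show ([fmt 2 4, fmt ((d.length : Nat) : Int) 9] ++
        prs.map (fun pr => fmt (fieldV pr) (fieldW pr))).flatten = S from by
      rw [hSdef, hF0, hFL]
      simp [List.flatten_cons, List.append_assoc]]
    rw [← hk1, ← hS1def, padTo8_eq S1, ← hS2def, chunkParse S2 h28, padCW_eq]
  have hstep2 : pushB (pushB (([], 0, 0) : List Int × Int × Int) 2 4) ((d.length : Nat) : Int) 9
      = stBits F0 := by
    rw [show (([], 0, 0) : List Int × Int × Int) = stBits [] from by
      simp [stBits, bytesOf, binVal]]
    rw [push_stBits [] 2 4 (by norm_num) (by norm_num),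
      List.nil_append,
      push_stBits _ _ 9 (Int.natCast_nonneg _) (by norm_num)]
    rw [show (4 : Int).toNat = 4 from rfl, show (9 : Int).toNat = 9 from rfl, hF0]
  have hfold : ∀ (init : List Int × Int × Int),
      (PySem.List.pyRange 0 ((d.length : Nat) : Int) 2).foldl (fun st i =>
        pushB st (fieldV (PySem.List.slice d (some i) (some (i + 2))))
          ((fieldW (PySem.List.slice d (some i) (some (i + 2))) : Int))) init =
      prs.foldl (fun st pr => pushB st (fieldV pr) ((fieldW pr : Int))) init := by
    intro init
    rw [hprs, List.foldl_map]
  have hbodyB : (fun (st : List Int × Int × Int) (i : Int) =>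
      let chunk := PySem.List.slice d (some i) (some (i + 2))
      if chunk.length == 2 then
        pushB st (chIdx ((PySem.List.pyGet? chunk 0).getD ' ') * 45 +
                  chIdx ((PySem.List.pyGet? chunk 1).getD ' ')) 11
      else pushB st (chIdx ((PySem.List.pyGet? chunk 0).getD ' ')) 6) =
      (fun st i => pushB st (fieldV (PySem.List.slice d (some i) (some (i + 2))))
        ((fieldW (PySem.List.slice d (some i) (some (i + 2))) : Int))) := by
    funext st i
    simp only
    unfold fieldV fieldW
    by_cases hp : ((PySem.List.slice d (some i) (some (i + 2))).length == 2) = true <;>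
      simp [hp]
  have hr1lt : S1.length % 8 < 8 := Nat.mod_lt _ (by norm_num)
  have hstep3 : (if (0 : Int) < min 4 (152 - (S.length : Int)) then
      pushB (stBits S) 0 (min 4 (152 - (S.length : Int))) else stBits S) = stBits S1 := by
    by_cases hterm : (0 : Int) < min 4 (152 - (S.length : Int))
    · rw [if_pos hterm, push_stBits S 0 _ le_rfl (by omega),
        fmt_zero _ (by omega), ← hk1, ← hS1def]
    · rw [if_neg hterm, hS1def, show k1 = 0 from by rw [hk1]; omega]
      simp
  have hstep4 : (if (0 : Int) < (stBits S1).2.2 then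
      pushB (stBits S1) 0 (8 - (stBits S1).2.2) else stBits S1) = stBits S2 := by
    by_cases hr : 0 < S1.length % 8
    · rw [if_pos (show (0 : Int) < (stBits S1).2.2 from by
        simp only [stBits]
        exact_mod_cast hr)]
      rw [show (8 : Int) - (stBits S1).2.2 = 8 - ((S1.length % 8 : Nat) : Int) from rfl]
      rw [push_stBits S1 0 _ le_rfl (by omega), fmt_zero _ (by omega)]
      rw [show ((8 : Int) - ((S1.length % 8 : Nat) : Int)).toNat = (8 - S1.length % 8) % 8
        from by omega]
    · rw [if_neg (by
        simp only [stBits]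
        omega)]
      rw [show S2 = S1 from by
        rw [hS2def, show (8 - S1.length % 8) % 8 = 0 from by omega]
        simp]
  have hB : build_data_codewords_py_alt data = bytesOf S2 ++
      (PySem.List.pyRange 0 (19 - ((bytesOf S2).length : Int)) 1).map
        (fun k => if PySem.Int.mod k 2 == 0 then (236 : Int) else 17) := by
    simp only [build_data_codewords_py_alt]
    rw [← hd, hstep2, hbodyB, hfold, foldl_push_fields prs F0, ← hFL, ← hSdef,
      stBits_total S, hstep3, hstep4, hfin]
  rw [hA, hB]
  refine congrArg (fun t => bytesOf S2 ++ t) ?_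
  rw [PySem.List.pyRange_one, List.map_map,
    show ((19 : Int) - ((bytesOf S2).length : Int) - 0).toNat = 19 - (bytesOf S2).length
      from by omega]
  refine List.map_congr_left (fun j hj => ?_)
  simp only [Function.comp_apply]
  have hmodj : PySem.Int.mod (0 + (j : Int)) 2 = (((j % 2 : Nat)) : Int) := by
    rw [PySem.Int.mod_eq_emod_of_pos (by norm_num)]
    omega
  rw [hmodj]
  by_cases hj2 : j % 2 = 0
  · simp [hj2]
  · simp [hj2]
    omega

-- ===== VERDICT (by name: the statement is the Claim_ definition above) =====
theorem build_data_codewords_py_spec : Claim_equal_build_data_codewords_py := by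
  intro data _ _
  unfold Spec_build_data_codewords_py
  exact main_eq data
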